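-- pv_equiv track=rewrite | github.com/Sembiance/dexvert | bin/vibeExtract/flogicielsImage/flogicielsImage.py | derive_key
-- ===== SOURCE A (Python) =====
-- def ror8(val, count):
--     count %= 8
--     return ((val >> count) | (val << (8 - count))) & 0xFF
--
-- KNOWN_BYTES_8BIT = {
--     0: 0x42,   # 'B' signature
--     1: 0x4D,   # 'M' signature
--     6: 0x00,   # reserved
--     7: 0x00,   # reserved
--     8: 0x00,   # reserved
--     9: 0x00,   # reserved
--     10: 0x36,  # bfOffBits low byte (1078 = 14 + 40 + 256*4)
--     11: 0x04,  # bfOffBits byte 2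
--     12: 0x00,  # bfOffBits byte 3
--     13: 0x00,  # bfOffBits byte 4
--     14: 0x28,  # biSize = 40 (BITMAPINFOHEADER)
--     15: 0x00,  # biSize byte 2
--     16: 0x00,  # biSize byte 3
--     17: 0x00,  # biSize byte 4
--     26: 0x01,  # biPlanes = 1
--     27: 0x00,  # biPlanes high
--     28: 0x08,  # biBitCount = 8
--     29: 0x00,  # biBitCount high
--     30: 0x00,  # biCompression = 0 (BI_RGB)
--     31: 0x00,  # biCompression byte 2
--     32: 0x00,  # biCompression byte 3
--     33: 0x00,  # biCompression byte 4
-- }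
--
-- def derive_key(enc_data, known_bytes=KNOWN_BYTES_8BIT):
--     """Derive the 14-byte key from known BMP header plaintext bytes."""
--     key = [None] * 14
--     for pos in sorted(known_bytes.keys()):
--         if pos >= len(enc_data):
--             continue
--         byte_index = pos + 1
--         key_offset = byte_index % 14
--         # Count how many times this key position was used before this byte
--         uses_before = sum(1 for ep in range(pos) if (ep + 1) % 14 == key_offset)
--         plain = known_bytes[pos]
--         not_plain = (~plain) & 0xFF
--         rotated = ror8(not_plain, 1)
--         used_key = enc_data[pos] ^ rotated
--         original = (used_key - uses_before) & 0xFF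
--         if key[key_offset] is None:
--             key[key_offset] = original
--         elif key[key_offset] != original:
--             return None  # Inconsistent - wrong assumptions
--     return key
-- ===== SOURCE B (Python) =====
-- def ror8(val, count):
--     count %= 8
--     return ((val >> count) | (val << (8 - count))) & 0xFF
--
-- KNOWN_BYTES_8BIT = {
--     0: 0x42, 1: 0x4D, 6: 0x00, 7: 0x00, 8: 0x00, 9: 0x00,
--     10: 0x36, 11: 0x04, 12: 0x00, 13: 0x00, 14: 0x28, 15: 0x00,
--     16: 0x00, 17: 0x00, 26: 0x01, 27: 0x00, 28: 0x08, 29: 0x00,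
--     30: 0x00, 31: 0x00, 32: 0x00, 33: 0x00,
-- }
--
-- def derive_key(enc_data, known_bytes=KNOWN_BYTES_8BIT):
--     """Derive the 14-byte key: group known positions by key slot, then solve each
--     slot independently, with the use count in closed form."""
--     n = len(enc_data)
--     slots = [[] for _ in range(14)]
--     for pos in sorted(known_bytes):
--         if pos < n:
--             slots[(pos + 1) % 14].append(pos)
--     key = []
--     for bucket in slots:
--         value = None
--         for pos in bucket:
--             rotated = ror8((~known_bytes[pos]) & 0xFF, 1)
--             uses_before = pos // 14 if pos > 0 else 0
--             original = ((enc_data[pos] ^ rotated) - uses_before) & 0xFF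
--             if value is None:
--                 value = original
--             elif value != original:
--                 return None
--         key.append(value)
--     return key
-- ===== Notes on version B (the rewrite author's own statement) =====
-- stated objective: alternative
-- what changed: B replaces A's per-position inner counting loop by the closed-form use count pos//14 and restructures the single interleaved pass into a grouping pass that buckets the known positions by key slot followed by an independent per-slot consistency scan.
import Mathlib
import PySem

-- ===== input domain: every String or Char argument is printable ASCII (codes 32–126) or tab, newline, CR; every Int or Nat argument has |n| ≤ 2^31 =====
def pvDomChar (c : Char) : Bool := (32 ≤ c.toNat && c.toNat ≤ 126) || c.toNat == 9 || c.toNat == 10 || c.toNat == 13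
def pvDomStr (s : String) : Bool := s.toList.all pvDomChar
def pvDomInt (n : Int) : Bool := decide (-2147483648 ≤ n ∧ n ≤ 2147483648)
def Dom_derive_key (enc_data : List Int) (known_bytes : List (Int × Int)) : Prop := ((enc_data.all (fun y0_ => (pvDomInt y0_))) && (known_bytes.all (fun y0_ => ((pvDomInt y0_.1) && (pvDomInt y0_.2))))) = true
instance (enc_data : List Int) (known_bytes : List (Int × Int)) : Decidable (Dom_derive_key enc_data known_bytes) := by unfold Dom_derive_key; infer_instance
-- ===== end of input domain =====

-- B replaces A's per-position inner counting loop by a closed-form use count and solves the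
-- 14 key slots independently after one grouping pass (objective: alternative).

-- ===== PORT A =====
-- ror8: Python's '>>'/'<<' on a nonnegative shift count; count % 8 ∈ [0,8) so .toNat is exact.
def ror8 (val count : Int) : Int :=
  let c := PySem.Int.mod count 8
  PySem.Int.band (PySem.Int.bor (val >>> c.toNat) (val <<< ((8:Int) - c).toNat)) 255

def derive_key (enc_data : List Int) (known_bytes : List (Int × Int)) : Option (List (Option Int)) :=
  let kb := PySem.Dict.ofList known_bytes
  (PySem.List.sorted kb.keys (fun x => x) false).foldl
    (fun acc pos =>
      match acc with
      | none => none          -- 'return None' already happened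
      | some key =>
        if (PySem.List.len enc_data) ≤ pos then some key    -- continue
        else
          let byte_index := pos + 1
          let key_offset := PySem.Int.mod byte_index 14
          let uses_before := ((PySem.List.pyRange 0 pos 1).map
            (fun ep => if PySem.Int.mod (ep + 1) 14 = key_offset then (1:Int) else 0)).sum
          let plain := kb.getD pos 0          -- pos ∈ keys, so the default is never read
          let not_plain := PySem.Int.band (Int.not plain) 255
          let rotated := ror8 not_plain 1
          -- enc_data[pos]: Pre_ excludes the IndexError case, so the default is never read
          let used_key := PySem.Int.bxor (PySem.List.pyGetD enc_data pos 0) rotated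
          let original := PySem.Int.band (used_key - uses_before) 255
          match PySem.List.pyGetD key key_offset none with
          | none => some (key.set key_offset.toNat (some original))
          | some v => if v = original then some key else none)
    (some (List.replicate 14 none))

-- ===== PORT B =====
-- the inner 'for pos in bucket' loop of Source B with its 'value' accumulator; 'return None' ↦ none
def derive_key_slot (enc_data : List Int) (kb : PySem.Dict Int Int) :
    List Int → Option Int → Option (Option Int)
  | [], value => some value
  | pos :: bucket, value =>
      let rotated := ror8 (PySem.Int.band (Int.not (kb.getD pos 0)) 255) 1
      let uses_before := if 0 < pos then PySem.Int.floordiv pos 14 else 0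
      let original := PySem.Int.band
        (PySem.Int.bxor (PySem.List.pyGetD enc_data pos 0) rotated - uses_before) 255
      match value with
      | none => derive_key_slot enc_data kb bucket (some original)
      | some v => if v = original then derive_key_slot enc_data kb bucket (some v) else none

def derive_key_alt (enc_data : List Int) (known_bytes : List (Int × Int)) : Option (List (Option Int)) :=
  let kb := PySem.Dict.ofList known_bytes
  let n := PySem.List.len enc_data
  let slots := (PySem.List.sorted kb.keys (fun x => x) false).foldl
      (fun slots pos =>
        if pos < n then slots.modify (PySem.Int.mod (pos + 1) 14).toNat (fun b => b ++ [pos])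
        else slots)
      (List.replicate 14 ([] : List Int))
  slots.foldl
    (fun acc bucket =>
      match acc with
      | none => none
      | some key =>
        match derive_key_slot enc_data kb bucket none with
        | none => none
        | some v => some (key ++ [v]))
    (some ([] : List (Option Int)))

-- ===== PRECONDITION & SPEC =====
-- Pre_ excludes exactly the inputs on which A raises IndexError: a known position that
-- passes the 'pos < len(enc_data)' test but lies below -len(enc_data).
def Pre_derive_key (enc_data : List Int) (known_bytes : List (Int × Int)) : Prop :=
  ∀ p ∈ known_bytes, p.1 < (enc_data.length : Int) → -(enc_data.length : Int) ≤ p.1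
instance (enc_data : List Int) (known_bytes : List (Int × Int)) : Decidable (Pre_derive_key enc_data known_bytes) := by unfold Pre_derive_key; infer_instance
def pvWitness_derive_key : List Int × (List (Int × Int)) := ([10, 20], [(0, 66), (1, 77)])

def Spec_derive_key (enc_data : List Int) (known_bytes : List (Int × Int)) (out : Option (List (Option Int))) : Prop := out = derive_key_alt enc_data known_bytes
instance (enc_data : List Int) (known_bytes : List (Int × Int)) (out : Option (List (Option Int))) : Decidable (Spec_derive_key enc_data known_bytes out) := by unfold Spec_derive_key; infer_instance

-- ===== CLAIM (what is proved, stated in full; the proofs are below) =====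
def Claim_equal_derive_key : Prop := ∀ (enc_data : List Int) (known_bytes : List (Int × Int)), Dom_derive_key enc_data known_bytes → Pre_derive_key enc_data known_bytes → Spec_derive_key enc_data known_bytes (derive_key enc_data known_bytes)

-- ===== LEMMAS AND PROOFS =====

-- the key slot of a position and the common per-position value both ports compute
def pvIdx (pos : Int) : Nat := (PySem.Int.mod (pos + 1) 14).toNat

def pvVal (enc_data : List Int) (kb : PySem.Dict Int Int) (pos : Int) : Int :=
  PySem.Int.band
    (PySem.Int.bxor (PySem.List.pyGetD enc_data pos 0)
        (ror8 (PySem.Int.band (Int.not (kb.getD pos 0)) 255) 1)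
      - (if 0 < pos then PySem.Int.floordiv pos 14 else 0)) 255

-- abstract per-slot solver (B's inner loop with an arbitrary value function)
def pvSlot (g : Int → Int) : List Int → Option Int → Option (Option Int)
  | [], v => some v
  | p :: B, v =>
    match v with
    | none => pvSlot g B (some (g p))
    | some w => if w = g p then pvSlot g B (some w) else none

-- abstract assembly fold (B's outer loop over the slot results)
def pvAsm (s : Nat → Option (Option Int)) (k : Nat) : Option (List (Option Int)) :=
  (List.range k).foldl
    (fun acc j =>
      match acc with
      | none => none
      | some key =>
        match s j with
        | none => none
        | some v => some (key ++ [v]))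
    (some [])

-- abstract per-position step (A's loop body with an arbitrary value function)
def pvStep (g : Int → Int) (acc : Option (List (Option Int))) (pos : Int) : Option (List (Option Int)) :=
  match acc with
  | none => none
  | some key =>
    match key.getD (pvIdx pos) none with
    | none => some (key.set (pvIdx pos) (some (g pos)))
    | some v => if v = g pos then some key else none

theorem pvIdx_lt (pos : Int) : pvIdx pos < 14 := by
  have h1 : PySem.Int.mod (pos + 1) 14 < 14 := PySem.Int.mod_lt (pos + 1) (by norm_num)
  have h2 : 0 ≤ PySem.Int.mod (pos + 1) 14 := PySem.Int.mod_nonneg (pos + 1) (by norm_num)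
  unfold pvIdx; omega

theorem pvSlot_append (g : Int → Int) (B C : List Int) (v : Option Int) :
    pvSlot g (B ++ C) v =
      match pvSlot g B v with
      | none => none
      | some v' => pvSlot g C v' := by
  induction B generalizing v with
  | nil => simp [pvSlot]
  | cons p B ih =>
    cases v with
    | none => simpa [pvSlot] using ih (some (g p))
    | some w =>
      by_cases hw : w = g p <;> simp [pvSlot, hw, ih]

theorem derive_key_slot_eq (enc_data : List Int) (kb : PySem.Dict Int Int)
    (B : List Int) (v : Option Int) :
    derive_key_slot enc_data kb B v = pvSlot (pvVal enc_data kb) B v := by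
  induction B generalizing v with
  | nil => rfl
  | cons p B ih =>
    cases v with
    | none => simpa [derive_key_slot, pvSlot, pvVal] using ih _
    | some w =>
      by_cases hw : w = pvVal enc_data kb p <;>
        simp [derive_key_slot, pvSlot, pvVal, hw, ih]

theorem pvAsm_char (s : Nat → Option (Option Int)) (k : Nat) :
    pvAsm s k =
      if ∀ j < k, (s j).isSome then
        some ((List.range k).map (fun j => (s j).getD none))
      else none := by
  induction k with
  | zero => simp [pvAsm]
  | succ k ih =>
    unfold pvAsm at ih ⊢
    rw [List.range_succ, List.foldl_append, ih]
    by_cases h : ∀ j < k, (s j).isSome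
    · rw [if_pos h]
      by_cases hk : (s k).isSome
      · have h' : ∀ j < k + 1, (s j).isSome := by
          intro j hj
          rcases Nat.lt_succ_iff_lt_or_eq.mp hj with hj' | rfl
          · exact h j hj'
          · exact hk
        rcases Option.isSome_iff_exists.mp hk with ⟨v, hv⟩
        rw [if_pos h']
        simp [hv]
      · have h' : ¬ ∀ j < k + 1, (s j).isSome := fun h' => hk (h' k (Nat.lt_succ_self k))
        rw [if_neg h']
        rcases Option.not_isSome_iff_eq_none.mp hk with hv
        simp [hv]
    · have h' : ¬ ∀ j < k + 1, (s j).isSome := by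
        intro h'; exact h (fun j hj => h' j (Nat.lt_succ_of_lt hj))
      rw [if_neg h, if_neg h']
      simp

theorem map_range_set {α : Type} (v : Nat → α) (n i : Nat) (x : α) :
    ((List.range n).map v).set i x = (List.range n).map (fun j => if j = i then x else v j) := by
  apply List.ext_getElem
  · simp
  · intro j h1 h2
    simp only [List.getElem_set, List.getElem_map, List.getElem_range]
    simp only [List.length_set, List.length_map, List.length_range] at h1
    split_ifs with hij hji hji
    · rfl
    · omega
    · omega
    · rfl

theorem pvFold_eq (g : Int → Int) (L : List Int) :
    L.foldl (pvStep g) (some (List.replicate 14 none)) =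
      pvAsm (fun j => pvSlot g (L.filter (fun p => pvIdx p == j)) none) 14 := by
  induction L using List.reverseRecOn with
  | nil =>
    rw [pvAsm_char]
    simp [pvSlot]
  | append_singleton L p ih =>
    rw [List.foldl_append, List.foldl_cons, List.foldl_nil, ih]
    have hfilt : ∀ j : Nat, (L ++ [p]).filter (fun q => pvIdx q == j) =
        L.filter (fun q => pvIdx q == j) ++ if pvIdx p = j then [p] else [] := by
      intro j
      rw [List.filter_append]
      by_cases h : pvIdx p = j <;> simp [h]
    set sL : Nat → Option (Option Int) := fun j => pvSlot g (L.filter (fun q => pvIdx q == j)) none with hsL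
    have hsL' : ∀ j : Nat, pvSlot g ((L ++ [p]).filter (fun q => pvIdx q == j)) none =
        if pvIdx p = j then
          (match sL j with
            | none => none
            | some v => pvSlot g [p] v)
        else sL j := by
      intro j
      rw [hfilt j]
      by_cases h : pvIdx p = j
      · subst h
        rw [pvSlot_append]
        simp only []
        rfl
      · simp only [if_neg h, List.append_nil]
        rfl
    by_cases H : ∀ j < 14, (sL j).isSome
    · -- all slots consistent so far
      rw [pvAsm_char, if_pos H]
      set key : List (Option Int) := (List.range 14).map (fun j => (sL j).getD none) with hkey
      have hlen : key.length = 14 := by simp [hkey]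
      have hlt := pvIdx_lt p
      have hread : key[pvIdx p]? = some ((sL (pvIdx p)).getD none) := by
        rw [List.getElem?_eq_getElem (by simpa [hkey] using hlt)]
        simp [hkey]
      rcases Option.isSome_iff_exists.mp (H (pvIdx p) hlt) with ⟨v, hv⟩
      cases v with
      | none =>
        -- slot untouched so far: A sets it, B's slot run yields g p
        have hstep : pvStep g (some key) p = some (key.set (pvIdx p) (some (g p))) := by
          simp [pvStep, hread, hv]
        rw [hstep, pvAsm_char]
        have H' : ∀ j < 14, (pvSlot g ((L ++ [p]).filter (fun q => pvIdx q == j)) none).isSome := by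
          intro j hj
          rw [hsL' j]
          by_cases h : pvIdx p = j
          · rw [if_pos h, ← h, hv]; simp [pvSlot]
          · rw [if_neg h]; exact H j hj
        rw [if_pos H']
        congr 1
        rw [hkey, map_range_set]
        apply List.map_congr_left
        intro j hj
        rw [hsL' j]
        by_cases h : pvIdx p = j
        · rw [if_pos h, if_pos h.symm, ← h, hv]; simp [pvSlot]
        · rw [if_neg h, if_neg (fun hh => h hh.symm)]
      | some w =>
        by_cases hw : w = g p
        · -- consistent candidate: state unchanged
          have hstep : pvStep g (some key) p = some key := by
            simp [pvStep, hread, hv, hw]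
          rw [hstep]
          have hsame : (fun j => pvSlot g ((L ++ [p]).filter (fun q => pvIdx q == j)) none) = sL := by
            funext j
            rw [hsL' j]
            by_cases h : pvIdx p = j
            · rw [if_pos h, ← h, hv]; simp [pvSlot, hw]
            · rw [if_neg h]
          rw [hsame, pvAsm_char, if_pos H]
        · -- conflict: both return none
          have hstep : pvStep g (some key) p = none := by
            simp [pvStep, hread, hv, hw]
          rw [hstep, pvAsm_char, if_neg]
          intro H'
          have := H' (pvIdx p) hlt
          rw [hsL' (pvIdx p), if_pos rfl, hv] at this
          simp [pvSlot, hw] at this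
    · -- an earlier conflict: none stays none
      rw [pvAsm_char, if_neg H]
      have hnone : pvStep g none p = none := rfl
      rw [hnone, pvAsm_char, if_neg]
      intro H'
      apply H
      intro j hj
      have := H' j hj
      rw [hsL' j] at this
      by_cases h : pvIdx p = j
      · rw [if_pos h] at this
        rcases hv : sL j with _ | v
        · rw [hv] at this; simp at this
        · simp
      · rwa [if_neg h] at this

-- the closed-form use count: #{ep ∈ [0,pos) | (ep+1) % 14 = (pos+1) % 14} = pos // 14 (0 for pos ≤ 0)
theorem count_mod_range (m : Nat) :
    (List.range m).countP (fun k => decide (k % 14 = m % 14)) = m / 14 := by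
  induction m using Nat.strong_induction_on with
  | _ m ih =>
    by_cases h14 : m < 14
    · have h0 : (List.range m).countP (fun k => decide (k % 14 = m % 14)) = 0 := by
        rw [List.countP_eq_zero]
        intro k hk
        rw [List.mem_range] at hk
        simp only [decide_eq_true_eq]
        omega
      omega
    · obtain ⟨k, rfl⟩ : ∃ k, m = k + 14 := ⟨m - 14, by omega⟩
      simp only [Nat.add_mod_right]
      rw [List.range_add, List.countP_append, List.countP_map, ih k (by omega)]
      have h2 : (List.range 14).countP ((fun j => decide (j % 14 = k % 14)) ∘ (fun x => k + x))
          = (List.range 14).countP (fun i => decide (i = 0)) := by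
        apply List.countP_congr
        intro i hi
        rw [List.mem_range] at hi
        simp only [Function.comp, decide_eq_true_eq]
        omega
      rw [h2, show (List.range 14).countP (fun i => decide (i = 0)) = 1 from by decide]
      omega

theorem uses_eq (pos : Int) :
    ((PySem.List.pyRange 0 pos 1).map
        (fun ep => if PySem.Int.mod (ep + 1) 14 = PySem.Int.mod (pos + 1) 14 then (1:Int) else 0)).sum
      = if 0 < pos then PySem.Int.floordiv pos 14 else 0 := by
  by_cases hp : 0 < pos
  · rw [if_pos hp]
    obtain ⟨m, rfl⟩ : ∃ m : Nat, pos = (m : Int) :=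
      ⟨pos.toNat, (Int.toNat_of_nonneg (le_of_lt hp)).symm⟩
    rw [PySem.List.pyRange_one, List.map_map]
    have hmap : List.map
          ((fun ep => if PySem.Int.mod (ep + 1) 14 = PySem.Int.mod ((m:Int) + 1) 14 then (1:Int) else 0)
            ∘ fun k : Nat => (0:Int) + ↑k) (List.range ((m:Int) - 0).toNat)
        = List.map (fun k : Nat => if (decide (k % 14 = m % 14) : Bool) then (1:Int) else 0)
            (List.range m) := by
      have hn : ((m:Int) - 0).toNat = m := by omega
      rw [hn]
      apply List.map_congr_left
      intro k _hk
      simp only [Function.comp]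
      have e1 : (0:Int) + ↑k + 1 = ((k + 1 : Nat) : Int) := by push_cast; ring
      have e2 : ((m:Int) + 1) = ((m + 1 : Nat) : Int) := by push_cast; ring
      have e3 : (14:Int) = ((14:Nat):Int) := by norm_num
      rw [e1, e2, e3, PySem.Int.mod_natCast, PySem.Int.mod_natCast]
      have hiff : ((((k+1) % 14 : Nat)) : Int) = (((m+1) % 14 : Nat) : Int) ↔ k % 14 = m % 14 := by
        rw [Int.natCast_inj]; omega
      by_cases h : k % 14 = m % 14
      · rw [if_pos (hiff.mpr h)]; simp [h]
      · rw [if_neg (fun hh => h (hiff.mp hh))]; simp [h]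
    rw [hmap, PySem.List.sum_map_ite_one_zero, count_mod_range m]
    exact_mod_cast (PySem.Int.floordiv_natCast m 14).symm
  · rw [if_neg hp, PySem.List.pyRange_one]
    have h0 : (pos - 0).toNat = 0 := by omega
    rw [h0]
    simp

-- B's grouping pass builds exactly the per-slot filters of the admitted positions
theorem build_slots_eq (L : List Int) :
    L.foldl (fun slots pos => slots.modify (pvIdx pos) (fun b => b ++ [pos]))
        (List.replicate 14 ([] : List Int))
      = (List.range 14).map (fun j => L.filter (fun p => pvIdx p == j)) := by
  induction L using List.reverseRecOn with
  | nil => simp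
  | append_singleton L p ih =>
    rw [List.foldl_append, List.foldl_cons, List.foldl_nil, ih]
    have hlt := pvIdx_lt p
    apply List.ext_getElem
    · simp
    · intro j h1 h2
      simp only [List.length_map, List.length_range] at h2
      simp only [List.getElem_modify, List.getElem_map, List.getElem_range, List.filter_append]
      by_cases h : pvIdx p = j <;> simp [h]

-- A's fold is the filtered abstract fold (skip test inverted, use count in closed form)
theorem A_as_fold (enc_data : List Int) (known_bytes : List (Int × Int)) :
    derive_key enc_data known_bytes =
      ((PySem.List.sorted (PySem.Dict.ofList known_bytes).keys (fun x => x) false).filter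
          (fun pos => decide (pos < PySem.List.len enc_data))).foldl
        (pvStep (pvVal enc_data (PySem.Dict.ofList known_bytes)))
        (some (List.replicate 14 none)) := by
  rw [List.foldl_filter]
  unfold derive_key
  simp only []
  congr 1
  funext acc pos
  cases acc with
  | none => cases hd : decide (pos < PySem.List.len enc_data) <;> simp [pvStep]
  | some key =>
    simp only []
    by_cases hlt : pos < PySem.List.len enc_data
    · rw [if_neg (not_le.mpr hlt)]
      simp only [hlt, decide_true, if_true]
      rw [uses_eq pos]
      have hko : PySem.Int.mod (pos + 1) 14 = ((pvIdx pos : Nat) : Int) :=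
        (Int.toNat_of_nonneg (PySem.Int.mod_nonneg _ (by norm_num))).symm
      rw [hko, PySem.List.pyGetD_natCast]
      simp [pvStep, pvVal]
    · rw [if_pos (not_lt.mp hlt), if_neg (by simpa using hlt)]

-- B is the abstract assembly of the per-slot solver over the grouped positions
theorem B_as_asm (enc_data : List Int) (known_bytes : List (Int × Int)) :
    derive_key_alt enc_data known_bytes =
      pvAsm (fun j => pvSlot (pvVal enc_data (PySem.Dict.ofList known_bytes))
        ((((PySem.List.sorted (PySem.Dict.ofList known_bytes).keys (fun x => x) false).filter
            (fun pos => decide (pos < PySem.List.len enc_data)))).filter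
          (fun p => pvIdx p == j)) none) 14 := by
  unfold derive_key_alt
  simp only []
  have hbuild : (PySem.List.sorted (PySem.Dict.ofList known_bytes).keys (fun x => x) false).foldl
      (fun slots pos =>
        if pos < PySem.List.len enc_data then
          slots.modify (PySem.Int.mod (pos + 1) 14).toNat (fun b => b ++ [pos])
        else slots)
      (List.replicate 14 ([] : List Int))
      = ((PySem.List.sorted (PySem.Dict.ofList known_bytes).keys (fun x => x) false).filter
          (fun pos => decide (pos < PySem.List.len enc_data))).foldl
        (fun slots pos => slots.modify (pvIdx pos) (fun b => b ++ [pos]))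
        (List.replicate 14 ([] : List Int)) := by
    rw [List.foldl_filter]
    congr 1
    funext slots pos
    by_cases h : pos < PySem.List.len enc_data <;> simp [pvIdx]
  rw [hbuild, build_slots_eq, List.foldl_map]
  simp only [derive_key_slot_eq]
  rfl

-- A agrees with B (the Lean ports agree on every input; Pre_ marks where Python A raises)
theorem derive_key_eq_alt (enc_data : List Int) (known_bytes : List (Int × Int)) :
    derive_key enc_data known_bytes = derive_key_alt enc_data known_bytes := by
  rw [A_as_fold, B_as_asm, pvFold_eq]

-- ===== VERDICT (by name: the statement is the Claim_ definition above) =====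
theorem derive_key_spec : Claim_equal_derive_key := by
  intro enc_data known_bytes _hdom _hpre
  unfold Spec_derive_key
  exact derive_key_eq_alt enc_data known_bytes
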